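-- pv_equiv track=rewrite | github.com/Liza129/liza-s-repository | mean.py | last5
-- ===== SOURCE A (Python) =====
-- def last5(l):
--     a = []
--     for i in l:
--         if i not in a:
--             a.append(i)
--     a.sort()
--     last5 = a[:5]
--     return last5
-- ===== SOURCE B (Python) =====
-- def last5(l):
--     # sort first, then one adjacent-dedup scan that stops as soon as 5 uniques are collected
--     out = []
--     for v in sorted(l):
--         if len(out) == 5:
--             break
--         if not out or out[-1] != v:
--             out.append(v)
--     return out
-- ===== Notes on version B (the rewrite author's own statement) =====
-- stated objective: faster
-- what changed: A deduplicates with a quadratic membership-scan loop and then sorts the unique values; B sorts the whole list first and collects the 5 smallest by a single adjacent-dedup scan that stops early.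
import Mathlib
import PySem

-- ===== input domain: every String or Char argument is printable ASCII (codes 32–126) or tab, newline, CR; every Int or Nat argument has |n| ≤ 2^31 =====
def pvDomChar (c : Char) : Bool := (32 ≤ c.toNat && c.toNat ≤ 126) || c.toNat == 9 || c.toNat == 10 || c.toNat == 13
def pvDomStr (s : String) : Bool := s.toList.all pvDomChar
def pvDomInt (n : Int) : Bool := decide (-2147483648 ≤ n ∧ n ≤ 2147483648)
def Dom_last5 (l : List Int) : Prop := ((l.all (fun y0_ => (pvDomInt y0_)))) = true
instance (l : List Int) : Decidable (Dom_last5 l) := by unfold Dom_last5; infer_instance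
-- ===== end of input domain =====

-- B sorts the whole list first and collects the 5 smallest uniques in one adjacent-dedup
-- scan with early stop, instead of A's quadratic membership-scan dedup followed by a sort.

-- ===== PORT A =====
-- a = []; for i in l: if i not in a: a.append(i)
def last5A_dedup (l : List Int) : List Int :=
  l.foldl (fun a i => if i ∈ a then a else a ++ [i]) []

def last5 (l : List Int) : List Int :=
  let a := last5A_dedup l
  let a := PySem.List.sorted a (fun x => x) false   -- a.sort()
  PySem.List.slice a none (some 5)                  -- a[:5]

-- ===== PORT B =====
-- for v in sorted(l): if len(out)==5: break; if not out or out[-1] != v: out.append(v)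
def last5B_loop (out : List Int) : List Int → List Int
  | [] => out
  | v :: rest =>
    if out.length = 5 then out
    else last5B_loop (if out = [] ∨ out.getLast? ≠ some v then out ++ [v] else out) rest

def last5_alt (l : List Int) : List Int :=
  last5B_loop [] (PySem.List.sorted l (fun x => x) false)

-- ===== PRECONDITION & SPEC =====
def Spec_last5 (l : List Int) (out : List Int) : Prop := out = last5_alt l
instance (l : List Int) (out : List Int) : Decidable (Spec_last5 l out) := by unfold Spec_last5; infer_instance

-- ===== CLAIM (what is proved, stated in full; the proofs are below) =====
def Claim_equal_last5 : Prop := ∀ (l : List Int), Dom_last5 l → Spec_last5 l (last5 l)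

-- ===== LEMMAS AND PROOFS =====

-- adjacent dedup relative to the previously kept element (functional model of B's scan)
def dd2 (p : Option Int) : List Int → List Int
  | [] => []
  | x :: xs => if p = some x then dd2 p xs else x :: dd2 (some x) xs

theorem last5B_loop_eq : ∀ (s out : List Int), out.length ≤ 5 →
    last5B_loop out s = out ++ (dd2 out.getLast? s).take (5 - out.length) := by
  intro s
  induction s with
  | nil => intro out h; simp [last5B_loop, dd2]
  | cons v rest ih =>
    intro out h
    by_cases h5 : out.length = 5
    · simp [last5B_loop, h5]
    · have hlt : out.length < 5 := lt_of_le_of_ne h h5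
      by_cases hc : out = [] ∨ out.getLast? ≠ some v
      · have hne : out.getLast? ≠ some v := by
          rcases hc with rfl | hc
          · simp
          · exact hc
        have : last5B_loop out (v :: rest) = last5B_loop (out ++ [v]) rest := by
          simp [last5B_loop, h5, hc]
        rw [this, ih (out ++ [v]) (by simp; omega)]
        have hlast' : (out ++ [v]).getLast? = some v := by simp
        have h1 : dd2 out.getLast? (v :: rest) = v :: dd2 (some v) rest := by
          simp [dd2]
          intro hEq; exact absurd hEq hne
        rw [hlast', h1]
        have h2 : 5 - out.length = (5 - (out ++ [v]).length) + 1 := by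
          simp; omega
        rw [h2, List.take_succ_cons, List.append_assoc]
        simp
      · push Not at hc
        obtain ⟨hne, hlast⟩ := hc
        have : last5B_loop out (v :: rest) = last5B_loop out rest := by
          simp [last5B_loop, h5, hne, hlast]
        rw [this, ih out h]
        have h1 : dd2 out.getLast? (v :: rest) = dd2 out.getLast? rest := by
          simp [dd2, hlast]
        rw [h1]

-- A's dedup loop: result is Nodup with exactly the elements of acc ++ l
theorem dedup_fold_spec : ∀ (l acc : List Int), acc.Nodup →
    (l.foldl (fun a i => if i ∈ a then a else a ++ [i]) acc).Nodup ∧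
    (∀ y, y ∈ l.foldl (fun a i => if i ∈ a then a else a ++ [i]) acc ↔ y ∈ acc ∨ y ∈ l) := by
  intro l
  induction l with
  | nil => intro acc h; simp [h]
  | cons x xs ih =>
    intro acc h
    by_cases hx : x ∈ acc
    · have := ih acc h
      constructor
      · simpa [hx] using this.1
      · intro y
        have h2 := this.2 y
        simp only [List.foldl_cons, if_pos hx]
        rw [h2]
        constructor
        · rintro (hy | hy) <;> simp [hy]
        · intro hy
          rcases hy with hy | hy
          · exact Or.inl hy
          · rcases List.mem_cons.mp hy with rfl | hy
            · exact Or.inl hx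
            · exact Or.inr hy
    · have hacc : (acc ++ [x]).Nodup := by
        simp [List.nodup_append, h]
        exact fun a ha hax => hx (hax ▸ ha)
      have := ih (acc ++ [x]) hacc
      constructor
      · simpa [hx] using this.1
      · intro y
        have h2 := this.2 y
        simp only [List.foldl_cons, if_neg hx]
        rw [h2]
        simp only [List.mem_append, List.mem_cons]
        tauto

-- B's dedup on a sorted list: strictly increasing, same membership (minus the pivot)
theorem dd2_some_spec : ∀ (s : List Int) (p : Int), (p :: s).Pairwise (· ≤ ·) →
    (∀ y ∈ dd2 (some p) s, p < y) ∧ (dd2 (some p) s).Pairwise (· < ·) ∧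
    (∀ y, y ∈ dd2 (some p) s ↔ y ∈ s ∧ y ≠ p) := by
  intro s
  induction s with
  | nil => intro p _; simp [dd2]
  | cons x xs ih =>
    intro p hp
    have hpx : p ≤ x := by
      have := List.pairwise_cons.mp hp
      exact this.1 x (by simp)
    have hxxs : (x :: xs).Pairwise (· ≤ ·) := (List.pairwise_cons.mp hp).2
    by_cases hx : p = x
    · subst hx
      have hpxs : (p :: xs).Pairwise (· ≤ ·) := by
        rw [List.pairwise_cons] at hp hxxs ⊢
        exact ⟨fun y hy => hxxs.1 y hy, hxxs.2⟩
      have := ih p hpxs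
      refine ⟨?_, ?_, ?_⟩
      · intro y hy; exact this.1 y (by simpa [dd2] using hy)
      · simpa [dd2] using this.2.1
      · intro y
        rw [show dd2 (some p) (p :: xs) = dd2 (some p) xs by simp [dd2], this.2.2 y]
        constructor
        · rintro ⟨h1, h2⟩; exact ⟨by simp [h1], h2⟩
        · rintro ⟨h1, h2⟩
          rcases List.mem_cons.mp h1 with rfl | h1
          · exact absurd rfl h2
          · exact ⟨h1, h2⟩
    · have hplt : p < x := lt_of_le_of_ne hpx hx
      have hdd : dd2 (some p) (x :: xs) = x :: dd2 (some x) xs := by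
        simp [dd2]
        intro hEq; exact absurd hEq hx
      have hih := ih x hxxs
      refine ⟨?_, ?_, ?_⟩
      · intro y hy
        rw [hdd] at hy
        rcases List.mem_cons.mp hy with rfl | hy
        · exact hplt
        · exact lt_trans hplt (hih.1 y hy)
      · rw [hdd, List.pairwise_cons]
        exact ⟨fun y hy => hih.1 y hy, hih.2.1⟩
      · intro y
        rw [hdd]
        simp only [List.mem_cons, hih.2.2 y]
        constructor
        · rintro (rfl | ⟨h1, h2⟩)
          · exact ⟨Or.inl rfl, fun h => hx h.symm⟩
          · refine ⟨Or.inr h1, ?_⟩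
            intro h; subst h
            have := hih.1 y (by rw [hih.2.2]; exact ⟨h1, h2⟩)
            omega
        · rintro ⟨h1, h2⟩
          rcases h1 with rfl | h1
          · exact Or.inl rfl
          · by_cases hyx : y = x
            · exact Or.inl hyx
            · exact Or.inr ⟨h1, hyx⟩

theorem dd2_none_spec (s : List Int) (hs : s.Pairwise (· ≤ ·)) :
    (dd2 none s).Pairwise (· < ·) ∧ (∀ y, y ∈ dd2 none s ↔ y ∈ s) := by
  cases s with
  | nil => simp [dd2]
  | cons x xs =>
    have hdd : dd2 none (x :: xs) = x :: dd2 (some x) xs := by simp [dd2]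
    have hih := dd2_some_spec xs x hs
    rw [hdd]
    constructor
    · rw [List.pairwise_cons]
      exact ⟨fun y hy => hih.1 y hy, hih.2.1⟩
    · intro y
      simp only [List.mem_cons, hih.2.2 y]
      constructor
      · rintro (rfl | ⟨h1, _⟩)
        · exact Or.inl rfl
        · exact Or.inr h1
      · rintro (rfl | h1)
        · exact Or.inl rfl
        · by_cases hyx : y = x
          · exact Or.inl hyx
          · exact Or.inr ⟨h1, hyx⟩

-- two strictly increasing lists with the same members are identical
theorem strict_sorted_ext : ∀ (xs ys : List Int), xs.Pairwise (· < ·) → ys.Pairwise (· < ·) →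
    (∀ y, y ∈ xs ↔ y ∈ ys) → xs = ys := by
  intro xs
  induction xs with
  | nil =>
    intro ys _ _ hmem
    cases ys with
    | nil => rfl
    | cons b bs => exact absurd ((hmem b).mpr (by simp)) (by simp)
  | cons a as ih =>
    intro ys hx hy hmem
    cases ys with
    | nil => exact absurd ((hmem a).mp (by simp)) (by simp)
    | cons b bs =>
      have hxp := List.pairwise_cons.mp hx
      have hyp := List.pairwise_cons.mp hy
      have hab : a = b := by
        have ha : a ∈ b :: bs := (hmem a).mp (by simp)
        have hb : b ∈ a :: as := (hmem b).mpr (by simp)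
        rcases List.mem_cons.mp ha with h | h
        · exact h
        · rcases List.mem_cons.mp hb with h' | h'
          · exact h'.symm
          · have := hyp.1 a h; have := hxp.1 b h'; omega
      subst hab
      have htail : ∀ y, y ∈ as ↔ y ∈ bs := by
        intro y
        constructor
        · intro h
          have := (hmem y).mp (by simp [h])
          rcases List.mem_cons.mp this with rfl | h'
          · exact absurd (hxp.1 y h) (lt_irrefl y)
          · exact h'
        · intro h
          have := (hmem y).mpr (by simp [h])
          rcases List.mem_cons.mp this with rfl | h'
          · exact absurd (hyp.1 y h) (lt_irrefl y)
          · exact h'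
      rw [ih bs hxp.2 hyp.2 htail]

theorem core_eq (l : List Int) :
    PySem.List.sorted (last5A_dedup l) (fun x => x) false =
    dd2 none (PySem.List.sorted l (fun x => x) false) := by
  have hd := dedup_fold_spec l [] (by simp)
  have hsortedA : (PySem.List.sorted (last5A_dedup l) (fun x => x) false).Pairwise (· < ·) := by
    have hle := PySem.List.sorted_pairwise (xs := last5A_dedup l) (key := fun x => x)
    have hperm := PySem.List.sorted_perm (xs := last5A_dedup l) (key := fun x => x) false
    have hnd : (PySem.List.sorted (last5A_dedup l) (fun x => x) false).Nodup :=
      hperm.nodup_iff.mpr hd.1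
    have := hle.and hnd
    exact this.imp (by intro a b h; exact lt_of_le_of_ne h.1 h.2)
  have hsortedL := PySem.List.sorted_pairwise (xs := l) (key := fun x => x)
  have hb := dd2_none_spec _ hsortedL
  refine strict_sorted_ext _ _ hsortedA hb.1 ?_
  intro y
  rw [PySem.List.mem_sorted, hb.2 y, PySem.List.mem_sorted]
  exact (hd.2 y).trans (by simp)

-- ===== VERDICT (by name: the statement is the Claim_ definition above) =====
theorem last5_spec : Claim_equal_last5 := by
  intro l _
  unfold Spec_last5 last5 last5_alt
  rw [last5B_loop_eq _ [] (by simp)]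
  have h5 : PySem.List.slice (PySem.List.sorted (last5A_dedup l) (fun x => x) false) none (some 5)
      = (PySem.List.sorted (last5A_dedup l) (fun x => x) false).take 5 := by
    have h := PySem.List.slice_to_natCast (xs := PySem.List.sorted (last5A_dedup l) (fun x => x) false) (b := 5)
    norm_num at h
    exact h
  rw [h5, core_eq l]
  simp
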